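-- pv_equiv track=rewrite | github.com/jmctsm/docker_ansible_stig | disa_scap_converters/arista_scap_converter.py | fix_commands
-- ===== SOURCE A (Python) =====
-- def fix_commands(fix_text_str):
--     """
--     Takes a string for the fix text and returns the commands within the text
--     that need to be applied to a device
--     """
--     return_string = ""
--     line_counter = 0
--     split_text = fix_text_str.split("\n")
--     config_new_words = ["configure\n", "configure\r", "configure", "config\n",
--                         "config\r", "configure", "config",]
--     startwith_tuple = ("logging level", "aaa authentication",
--                        "dot1x system-auth-control", "username ")
--     while line_counter < len(split_text):
--         if "(con" in split_text[line_counter]: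
--             counter = 0
--             while counter < len(split_text[line_counter]):
--                 if split_text[line_counter][counter] == '#':
--                     counter += 1
--                     return_string += f"{ split_text[line_counter][counter:] }\n"
--                     counter = len(split_text[line_counter]) + 10
--                 counter += 1
--         elif (split_text[line_counter] in config_new_words
--               or split_text[line_counter].startswith(startwith_tuple)):
--             return_string += f"{ split_text[line_counter] }\n"
--             line_counter += 1
--             while line_counter < len(split_text) and not split_text[line_counter] == "":
--                 return_string += f"{ split_text[line_counter] }\n"
--                 line_counter += 1
--         line_counter += 1
--     return return_string
-- ===== SOURCE B (Python) =====
-- def fix_commands(fix_text_str):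
--     """
--     Takes a string for the fix text and returns the commands within the text
--     that need to be applied to a device
--     """
--     config_new_words = ("configure\n", "configure\r", "configure", "config\n",
--                        "config\r", "config")
--     startwith_tuple = ("logging level", "aaa authentication",
--                        "dot1x system-auth-control", "username ")
--     out = ""
--     in_block = False
--     for line in fix_text_str.split("\n"):
--         if in_block:
--             if line == "":
--                 in_block = False
--             else:
--                 out += line + "\n"
--         elif "(con" in line:
--             idx = line.find("#")
--             if idx != -1:
--                 out += line[idx + 1:] + "\n"
--         elif line in config_new_words or line.startswith(startwith_tuple):
--             out += line + "\n"
--             in_block = True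
--     return out
-- ===== Notes on version B (the rewrite author's own statement) =====
-- stated objective: simpler
-- what changed: Replaced A's two nested index-driven while loops (inner block-consuming loop and inner character-scan loop) with a single flat for-loop over the lines maintaining an in_block flag, and the manual hash-character scan with str.find.
import Mathlib
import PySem

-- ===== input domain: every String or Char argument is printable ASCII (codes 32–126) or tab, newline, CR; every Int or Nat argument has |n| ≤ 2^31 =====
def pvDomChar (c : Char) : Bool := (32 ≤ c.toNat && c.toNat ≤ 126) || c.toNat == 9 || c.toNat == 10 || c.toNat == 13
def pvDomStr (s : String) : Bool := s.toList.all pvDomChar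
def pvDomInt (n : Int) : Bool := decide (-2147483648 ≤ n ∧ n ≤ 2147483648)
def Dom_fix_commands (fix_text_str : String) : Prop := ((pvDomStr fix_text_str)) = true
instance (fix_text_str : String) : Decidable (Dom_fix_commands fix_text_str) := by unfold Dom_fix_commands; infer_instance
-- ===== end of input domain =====

-- B replaces A's two nested index-driven while loops by one flat pass over the lines with an
-- in_block flag (objective: simpler decomposition; same asymptotic cost).

-- ===== PORT A =====
def pvCfgWordsA : List String :=
  ["configure\n", "configure\r", "configure", "config\n", "config\r", "configure", "config"]
def pvPrefixes : List String :=
  ["logging level", "aaa authentication", "dot1x system-auth-control", "username "]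

-- A's inner character scan: `while counter < len(line): if line[counter]=='#': counter+=1;
-- return_string += line[counter:]+"\n"; counter = len+10; counter += 1`
def pvScanHash (line : String) (counter : Nat) (acc : String) : String :=
  if h : (counter : Int) < PySem.Str.len line then
    if PySem.Str.pyGet? line (counter : Int) = some '#' then
      acc ++ PySem.Str.slice line (some ((counter : Int) + 1)) none ++ "\n"
    else pvScanHash line (counter + 1) acc
  else acc
termination_by line.toList.length - counter
decreasing_by
  simp only [PySem.Str.len_eq] at h
  omega

-- A's inner block loop (`while line_counter < len and not line == ""`) together with the
-- outer `line_counter += 1` that skips the terminating blank line.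
def pvConsume (lines : List String) (acc : String) : String × List String :=
  match lines with
  | [] => (acc, [])
  | l :: rest => if l = "" then (acc, rest) else pvConsume rest (acc ++ l ++ "\n")

theorem pvConsume_len (lines : List String) (acc : String) :
    (pvConsume lines acc).2.length ≤ lines.length := by
  induction lines generalizing acc with
  | nil => simp [pvConsume]
  | cons l rest ih =>
    simp only [pvConsume]
    split
    · simp
    · exact le_trans (ih _) (Nat.le_succ _)

-- A's outer while loop over line_counter.
def pvLoopA (lines : List String) (acc : String) : String :=
  match lines with
  | [] => acc
  | line :: rest =>
    if PySem.Str.isIn "(con" line then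
      pvLoopA rest (pvScanHash line 0 acc)
    else if pvCfgWordsA.contains line
         || pvPrefixes.any (fun p => PySem.Str.startswith line p) then
      pvLoopA (pvConsume rest (acc ++ line ++ "\n")).2 (pvConsume rest (acc ++ line ++ "\n")).1
    else
      pvLoopA rest acc
termination_by lines.length
decreasing_by
  · simp
  · simp only [List.length_cons]
    exact Nat.lt_succ_of_le (pvConsume_len rest _)
  · simp

def fix_commands (fix_text_str : String) : String :=
  pvLoopA ((PySem.Str.split? fix_text_str "\n").getD []) ""

-- ===== PORT B =====
def pvCfgWordsB : List String :=
  ["configure\n", "configure\r", "configure", "config\n", "config\r", "config"]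

def pvAltStep (st : String × Bool) (line : String) : String × Bool :=
  if st.2 then
    if line = "" then (st.1, false) else (st.1 ++ line ++ "\n", true)
  else if PySem.Str.isIn "(con" line then
    if PySem.Str.find line "#" ≠ -1 then
      (st.1 ++ PySem.Str.slice line (some (PySem.Str.find line "#" + 1)) none ++ "\n", st.2)
    else st
  else if pvCfgWordsB.contains line
       || pvPrefixes.any (fun p => PySem.Str.startswith line p) then
    (st.1 ++ line ++ "\n", true)
  else st

def fix_commands_alt (fix_text_str : String) : String :=
  (((PySem.Str.split? fix_text_str "\n").getD []).foldl pvAltStep ("", false)).1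

-- ===== PRECONDITION & SPEC =====
def Spec_fix_commands (fix_text_str : String) (out : String) : Prop := out = fix_commands_alt fix_text_str
instance (fix_text_str : String) (out : String) : Decidable (Spec_fix_commands fix_text_str out) := by unfold Spec_fix_commands; infer_instance

-- ===== CLAIM (what is proved, stated in full; the proofs are below) =====
def Claim_equal_fix_commands : Prop := ∀ (fix_text_str : String), Dom_fix_commands fix_text_str → Spec_fix_commands fix_text_str (fix_commands fix_text_str)

-- ===== LEMMAS AND PROOFS =====

theorem pv_singleton_prefix (a : Char) (l : List Char) : [a] <+: l ↔ l[0]? = some a := by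
  cases l <;> simp [List.prefix_cons_iff, eq_comm]

theorem pv_find_char_eq (cs : List Char) (a : Char) (k : Nat)
        (hhit : cs[k]? = some a) (hmin : ∀ j < k, cs[j]? ≠ some a) :
    PySem.Chars.find cs [a] = (k : Int) := by
  have hinf : [a] <:+: cs := (List.singleton_infix_iff a cs).2 (List.mem_of_getElem? hhit)
  have hnn : 0 ≤ PySem.Chars.find cs [a] := (PySem.Chars.find_nonneg_iff cs [a]).2 hinf
  obtain ⟨hpre, hlt⟩ := PySem.Chars.find_spec hnn
  have hpk : [a] <+: cs.drop k := by
    rw [pv_singleton_prefix]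
    simpa using hhit
  set f := PySem.Chars.find cs [a] with hf
  have h1 : ¬ k < f.toNat := fun h => (hlt k h) hpk
  have h2 : ¬ f.toNat < k := by
    intro h
    have := (pv_singleton_prefix a (cs.drop f.toNat)).1 hpre
    simp only [List.getElem?_drop, Nat.add_zero] at this
    exact hmin f.toNat h this
  omega

theorem pv_find_char_neg (cs : List Char) (a : Char) (h : ∀ j : Nat, cs[j]? ≠ some a) :
    PySem.Chars.find cs [a] = -1 := by
  rw [PySem.Chars.find_eq_neg_one_iff]
  intro hinf
  have hmem := (List.singleton_infix_iff a cs).1 hinf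
  obtain ⟨j, hj, he⟩ := List.getElem_of_mem hmem
  exact h j (by simp [List.getElem?_eq_getElem hj, he])

-- A's character scan computes exactly B's find-based hash extraction.
theorem pvScanHash_go (line : String) (acc : String) :
    ∀ (m counter : Nat), line.toList.length - counter ≤ m →
    (∀ j < counter, line.toList[j]? ≠ some '#') →
    pvScanHash line counter acc =
      if PySem.Str.find line "#" ≠ -1 then
        acc ++ PySem.Str.slice line (some (PySem.Str.find line "#" + 1)) none ++ "\n"
      else acc := by
  intro m
  induction m with
  | zero =>
    intro counter hm hj
    have hc : line.toList.length ≤ counter := by omega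
    rw [pvScanHash]
    have hlen : ¬ ((counter : Int) < PySem.Str.len line) := by
      simp only [PySem.Str.len_eq]
      exact_mod_cast Nat.not_lt.2 hc
    rw [dif_neg hlen]
    have : PySem.Str.find line "#" = -1 := by
      rw [PySem.Str.find_eq]
      have : ("#".toList) = ['#'] := by decide
      rw [this]
      apply pv_find_char_neg
      intro j
      by_cases h : j < counter
      · exact hj j h
      · have : line.toList.length ≤ j := by omega
        simp [List.getElem?_eq_none this]
    rw [if_neg (not_not_intro this)]
  | succ m ih =>
    intro counter hm hj
    rw [pvScanHash]
    by_cases hlen : (counter : Int) < PySem.Str.len line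
    · rw [dif_pos hlen]
      have hcl : counter < line.toList.length := by
        simp only [PySem.Str.len_eq] at hlen
        exact_mod_cast hlen
      by_cases hhit : PySem.Str.pyGet? line (counter : Int) = some '#'
      · rw [if_pos hhit]
        have hg : line.toList[counter]? = some '#' := by
          rw [PySem.Str.pyGet?_natCast] at hhit
          exact_mod_cast hhit
        have hf : PySem.Str.find line "#" = (counter : Int) := by
          rw [PySem.Str.find_eq]
          have : ("#".toList) = ['#'] := by decide
          rw [this]
          exact pv_find_char_eq line.toList '#' counter hg hj
        rw [hf]
        have : ((counter : Int)) ≠ -1 := by omega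
        simp [this]
      · rw [if_neg hhit]
        apply ih (counter + 1) (by omega)
        intro j hjlt
        by_cases h : j < counter
        · exact hj j h
        · have : j = counter := by omega
          subst this
          rw [PySem.Str.pyGet?_natCast] at hhit
          exact_mod_cast hhit
    · rw [dif_neg hlen]
      have hc : line.toList.length ≤ counter := by
        simp only [PySem.Str.len_eq] at hlen
        omega
      have : PySem.Str.find line "#" = -1 := by
        rw [PySem.Str.find_eq]
        have h1 : ("#".toList) = ['#'] := by decide
        rw [h1]
        apply pv_find_char_neg
        intro j
        by_cases h : j < counter
        · exact hj j h
        · have : line.toList.length ≤ j := by omega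
          simp [List.getElem?_eq_none this]
      rw [if_neg (not_not_intro this)]

theorem pvScanHash_eq (line : String) (acc : String) :
    pvScanHash line 0 acc =
      if PySem.Str.find line "#" ≠ -1 then
        acc ++ PySem.Str.slice line (some (PySem.Str.find line "#" + 1)) none ++ "\n"
      else acc := by
  exact pvScanHash_go line acc line.toList.length 0 (by omega) (by omega)

theorem pv_contains_eq (line : String) :
    pvCfgWordsA.contains line = pvCfgWordsB.contains line := by
  by_cases h : line = "configure" <;>
    simp [pvCfgWordsA, pvCfgWordsB, h, List.contains_eq_mem]

theorem pv_main (n : Nat) : ∀ (lines : List String), lines.length ≤ n → ∀ (acc : String),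
    (pvLoopA lines acc = (lines.foldl pvAltStep (acc, false)).1)
    ∧ (pvLoopA (pvConsume lines acc).2 (pvConsume lines acc).1
        = (lines.foldl pvAltStep (acc, true)).1) := by
  induction n with
  | zero =>
    intro lines hl acc
    have : lines = [] := List.eq_nil_of_length_eq_zero (by omega)
    subst this
    simp [pvLoopA, pvConsume]
  | succ n ih =>
    intro lines hl acc
    cases lines with
    | nil => simp [pvLoopA, pvConsume]
    | cons line rest =>
      have hr : rest.length ≤ n := by
        simp only [List.length_cons] at hl
        omega
      constructor
      · rw [pvLoopA]
        by_cases hcon : PySem.Str.isIn "(con" line = true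
        · rw [if_pos hcon, pvScanHash_eq]
          have hcon' := hcon
          simp only [PySem.Str.isIn_eq,
            show ("(con".toList) = ['(', 'c', 'o', 'n'] from by decide] at hcon'
          by_cases hf : PySem.Str.find line "#" ≠ -1
          · rw [if_pos hf, (ih rest hr _).1]
            have hf' := hf
            simp only [ne_eq, PySem.Str.find_eq,
              show ("#".toList) = ['#'] from by decide] at hf'
            simp [pvAltStep, hcon', hf']
          · rw [if_neg hf, (ih rest hr _).1]
            have hf' := hf
            simp only [ne_eq, not_not, PySem.Str.find_eq,
              show ("#".toList) = ['#'] from by decide] at hf'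
            simp [pvAltStep, hcon', hf']
        · rw [if_neg hcon]
          have hcon' := hcon
          simp only [PySem.Str.isIn_eq,
            show ("(con".toList) = ['(', 'c', 'o', 'n'] from by decide] at hcon'
          by_cases hw : (pvCfgWordsA.contains line
              || pvPrefixes.any (fun p => PySem.Str.startswith line p)) = true
          · rw [if_pos hw, (ih rest hr _).2]
            have hw' : (pvCfgWordsB.contains line
                || pvPrefixes.any (fun p => PySem.Str.startswith line p)) = true := by
              rw [← pv_contains_eq]
              exact hw
            simp only [Bool.or_eq_true, List.contains_eq_mem, decide_eq_true_eq,
              List.any_eq_true, PySem.Str.startswith_eq] at hw'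
            simp [pvAltStep, hcon', hw']
          · rw [if_neg hw, (ih rest hr _).1]
            have hw' : ¬ (pvCfgWordsB.contains line
                || pvPrefixes.any (fun p => PySem.Str.startswith line p)) = true := by
              rw [← pv_contains_eq]
              exact hw
            simp only [Bool.or_eq_true, List.contains_eq_mem, decide_eq_true_eq,
              List.any_eq_true, PySem.Str.startswith_eq, not_or] at hw'
            simp [pvAltStep, hcon', hw']
      · rw [pvConsume]
        by_cases he : line = ""
        · rw [if_pos he, (ih rest hr _).1]
          simp [pvAltStep, he]
        · rw [if_neg he, (ih rest hr _).2]
          simp [pvAltStep, he]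

-- ===== VERDICT (by name: the statement is the Claim_ definition above) =====
theorem fix_commands_spec : Claim_equal_fix_commands := by
  intro s _
  unfold Spec_fix_commands fix_commands fix_commands_alt
  exact (pv_main _ _ le_rfl "").1
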